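-- pv_equiv track=rewrite | github.com/nrhchnd1412/python-dsa | ---revision---/company_ideas.py | company_names
-- ===== SOURCE A (Python) =====
-- from collections import defaultdict
--
-- def company_names(ideas):
--     '''
--     N = number of ideas
--     M = average word length
--     Time:O(N * M)
--     Space: O(1)
--     '''
--     suffix_map=defaultdict(set)
--
--     for idea in ideas:
--         prefix=idea[0]
--         suffix=idea[1:]
--         suffix_map[prefix].add(suffix)
--     total=0
--     for i in range(26):
--         for j in range(i+1,26):
--             ch1=chr(ord('a')+i)
--             ch2=chr(ord('a')+j)
--             if ch1 in suffix_map and ch2 in suffix_map: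
--                 # common suffix
--                 common = suffix_map[ch1] & suffix_map[ch2]
--                 count1 = len(suffix_map[ch1]-common)
--                 count2 = len(suffix_map[ch2]-common)
--                 total+=count1 * count2
--     return total*2
-- ===== SOURCE B (Python) =====
-- def company_names(ideas):
--     # Group by suffix instead of by prefix: for each distinct suffix record the
--     # set of first letters owning it, then count pairs via per-letter totals and
--     # a co-occurrence table instead of pairwise set intersections.
--     suffix_prefixes = {}
--     for idea in ideas:
--         p = ord(idea[0]) - ord('a')
--         if 0 <= p < 26:
--             s = idea[1:]
--             if s not in suffix_prefixes:
--                 suffix_prefixes[s] = set()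
--             suffix_prefixes[s].add(p)
--     cnt = {}
--     shared = {}
--     for pset in suffix_prefixes.values():
--         for a in pset:
--             cnt[a] = cnt.get(a, 0) + 1
--             for b in pset:
--                 if a < b:
--                     key = (a, b)
--                     shared[key] = shared.get(key, 0) + 1
--     total = 0
--     for i in range(26):
--         for j in range(i + 1, 26):
--             c = shared.get((i, j), 0)
--             total += (cnt.get(i, 0) - c) * (cnt.get(j, 0) - c)
--     return total * 2
-- ===== Notes on version B (the rewrite author's own statement) =====
-- stated objective: alternative
-- what changed: B groups ideas by suffix instead of by prefix: it builds a suffix-to-prefix-letter-set map, accumulates per-letter suffix counts and a letter-pair co-occurrence table in one pass over the groups, and evaluates (cnt[i]-shared[i][j])*(cnt[j]-shared[i][j]) for each letter pair, replacing A's 325 pairwise set intersections and differences.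
import Mathlib
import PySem

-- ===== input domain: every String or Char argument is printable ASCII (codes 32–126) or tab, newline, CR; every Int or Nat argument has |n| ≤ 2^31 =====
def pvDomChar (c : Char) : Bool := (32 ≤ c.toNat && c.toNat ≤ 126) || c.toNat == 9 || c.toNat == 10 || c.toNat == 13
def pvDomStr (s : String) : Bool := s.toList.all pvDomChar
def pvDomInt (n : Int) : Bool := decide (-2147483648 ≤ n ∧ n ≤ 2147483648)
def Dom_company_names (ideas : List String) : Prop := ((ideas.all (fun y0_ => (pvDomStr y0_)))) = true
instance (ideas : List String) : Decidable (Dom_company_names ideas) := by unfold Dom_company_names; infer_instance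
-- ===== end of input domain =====

-- B re-groups the ideas by suffix and counts letter-pair co-occurrences instead of
-- intersecting per-letter suffix sets pairwise (objective: alternative algorithm).

-- shared primitive transliterations of the Python expressions idea[0] and idea[1:]
-- (idea[0] made total via getD: Pre_ excludes the empty string, Python's IndexError)
def pvHd (s : String) : Char := (PySem.Str.pyGet? s 0).getD 'a'
def pvSuf (s : String) : String := PySem.Str.slice s (some 1) none

-- ===== PORT A =====
def pvBuildSuffixMap (ideas : List String) : PySem.Dict Char (PySem.Set String) :=
  ideas.foldl (fun d idea =>
    d.insert (pvHd idea) (PySem.Set.add (d.getD (pvHd idea) PySem.Set.empty) (pvSuf idea)))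
    PySem.Dict.empty

def company_names (ideas : List String) : Int :=
  let suffix_map := pvBuildSuffixMap ideas
  ((PySem.List.pyRange 0 26 1).foldl (fun total i =>
      (PySem.List.pyRange (i + 1) 26 1).foldl (fun total j =>
        let ch1 := Char.ofNat (97 + i.toNat)
        let ch2 := Char.ofNat (97 + j.toNat)
        if suffix_map.contains ch1 && suffix_map.contains ch2 then
          let s1 := suffix_map.getD ch1 PySem.Set.empty
          let s2 := suffix_map.getD ch2 PySem.Set.empty
          let common := PySem.Set.inter s1 s2
          total + PySem.Set.len (PySem.Set.diff s1 common) * PySem.Set.len (PySem.Set.diff s2 common)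
        else total) total)
    0) * 2

-- ===== PORT B =====
def pvBuildSuffixPrefixes (ideas : List String) : PySem.Dict String (PySem.Set Int) :=
  ideas.foldl (fun d idea =>
    let p : Int := ((pvHd idea).toNat : Int) - 97
    if 0 ≤ p ∧ p < 26 then
      let s := pvSuf idea
      let d1 := if d.contains s then d else d.insert s PySem.Set.empty
      d1.insert s (PySem.Set.add (d1.getD s PySem.Set.empty) p)
    else d)
    PySem.Dict.empty

def pvBuildCounts (values : List (PySem.Set Int)) :
    PySem.Dict Int Int × PySem.Dict (Int × Int) Int :=
  values.foldl (fun st pset =>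
    pset.foldl (fun st a =>
      (st.1.insert a (st.1.getD a 0 + 1),
       pset.foldl (fun sh b =>
         if a < b then sh.insert (a, b) (sh.getD (a, b) 0 + 1) else sh) st.2))
      st)
    (PySem.Dict.empty, PySem.Dict.empty)

def company_names_alt (ideas : List String) : Int :=
  let sp := pvBuildSuffixPrefixes ideas
  let cs := pvBuildCounts sp.values
  ((PySem.List.pyRange 0 26 1).foldl (fun total i =>
      (PySem.List.pyRange (i + 1) 26 1).foldl (fun total j =>
        let c := cs.2.getD (i, j) 0
        total + (cs.1.getD i 0 - c) * (cs.1.getD j 0 - c)) total)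
    0) * 2

-- ===== PRECONDITION & SPEC =====
-- Pre_ excludes inputs containing the empty string, on which A raises IndexError at idea[0].
def Pre_company_names (ideas : List String) : Prop := ∀ s ∈ ideas, s ≠ ""
instance (ideas : List String) : Decidable (Pre_company_names ideas) := by
  unfold Pre_company_names; infer_instance

def pvWitness_company_names : List String := ["coffee", "donuts", "time", "toffee"]

def Spec_company_names (ideas : List String) (out : Int) : Prop := out = company_names_alt ideas
instance (ideas : List String) (out : Int) : Decidable (Spec_company_names ideas out) := by
  unfold Spec_company_names; infer_instance

-- ===== CLAIM (what is proved, stated in full; the proofs are below) =====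
def Claim_equal_company_names : Prop := ∀ (ideas : List String), Dom_company_names ideas → Pre_company_names ideas → Spec_company_names ideas (company_names ideas)

-- ===== LEMMAS AND PROOFS =====

-- spec-level descriptions of the data both ports compute
def pvP (s : String) : Int := ((pvHd s).toNat : Int) - 97

def pvGoods (ideas : List String) : List String :=
  ideas.filter (fun x => decide (0 ≤ pvP x ∧ pvP x < 26))

def pvCh (i : Int) : Char := Char.ofNat (97 + i.toNat)

def pvS (ideas : List String) (i : Int) : PySem.Set String :=
  PySem.Set.ofList ((ideas.filter (fun s => pvHd s == pvCh i)).map pvSuf)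

def pvK (ideas : List String) : PySem.Set String :=
  PySem.Set.ofList ((pvGoods ideas).map pvSuf)

def pvG (ideas : List String) (s : String) : PySem.Set Int :=
  PySem.Set.ofList (((pvGoods ideas).filter (fun x => pvSuf x == s)).map pvP)

theorem pv_getD_fold_group {α κ ν : Type} [BEq κ] [LawfulBEq κ] [DecidableEq κ] [BEq ν]
    (l : List α) (key : α → κ) (val : α → ν) (d : PySem.Dict κ (PySem.Set ν)) (c : κ) :
    (l.foldl (fun d x =>
        d.insert (key x) (PySem.Set.add (d.getD (key x) PySem.Set.empty) (val x))) d).getD c PySem.Set.empty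
      = PySem.Set.update (d.getD c PySem.Set.empty) ((l.filter (fun x => key x == c)).map val) := by
  induction l generalizing d with
  | nil => simp [PySem.Set.update]
  | cons a t ih =>
    simp only [List.foldl_cons, List.filter_cons]
    by_cases h : key a = c
    · subst h
      rw [ih, PySem.Dict.getD_insert_self]
      simp [PySem.Set.update_cons]
    · have hb : (key a == c) = false := by simp [h]
      rw [ih, PySem.Dict.getD_insert_of_ne (hne := fun hc => h hc.symm)]
      simp [hb]

theorem pvA_getD (ideas : List String) (c : Char) :
    (pvBuildSuffixMap ideas).getD c PySem.Set.empty
      = PySem.Set.ofList ((ideas.filter (fun s => pvHd s == c)).map pvSuf) := by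
  unfold pvBuildSuffixMap
  rw [pv_getD_fold_group ideas pvHd pvSuf PySem.Dict.empty c]
  simp [PySem.Set.update_nil_left]

theorem pvA_contains (ideas : List String) (c : Char) :
    (pvBuildSuffixMap ideas).contains c = ideas.any (fun s => pvHd s == c) := by
  unfold pvBuildSuffixMap
  rw [PySem.Dict.contains_eq_decide_mem_keys, PySem.Dict.keys_foldl_insert_key]
  simp [PySem.Set.mem_update, PySem.Dict.keys_empty, eq_comm]
  rw [Bool.eq_iff_iff]
  simp [List.any_eq_true]
  exact ⟨fun ⟨a, ha, h⟩ => ⟨a, ha, h.symm⟩, fun ⟨a, ha, h⟩ => ⟨a, ha, h.symm⟩⟩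

theorem pvB_step (d : PySem.Dict String (PySem.Set Int)) (x : String) :
    (let p : Int := ((pvHd x).toNat : Int) - 97
     if 0 ≤ p ∧ p < 26 then
       let s := pvSuf x
       let d1 := if d.contains s then d else d.insert s PySem.Set.empty
       d1.insert s (PySem.Set.add (d1.getD s PySem.Set.empty) p)
     else d)
    = if 0 ≤ pvP x ∧ pvP x < 26 then
        d.insert (pvSuf x) (PySem.Set.add (d.getD (pvSuf x) PySem.Set.empty) (pvP x))
      else d := by
  show (if 0 ≤ pvP x ∧ pvP x < 26 then _ else d) = _
  by_cases hg : 0 ≤ pvP x ∧ pvP x < 26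
  · simp only [if_pos hg]
    by_cases hc : d.contains (pvSuf x)
    · simp [hc, pvP]
    · simp only [Bool.not_eq_true] at hc
      rw [if_neg (by simp [hc])]
      rw [PySem.Dict.getD_insert_self, PySem.Dict.insert_insert_self,
        PySem.Dict.getD_of_not_contains d PySem.Set.empty hc]
      rfl
  · simp [hg]

theorem pvB_eq_fold (ideas : List String) :
    pvBuildSuffixPrefixes ideas
      = (pvGoods ideas).foldl (fun d x =>
          d.insert (pvSuf x) (PySem.Set.add (d.getD (pvSuf x) PySem.Set.empty) (pvP x)))
          PySem.Dict.empty := by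
  unfold pvBuildSuffixPrefixes pvGoods
  rw [PySem.List.foldl_congr_mem _ _
      (fun d x => if 0 ≤ pvP x ∧ pvP x < 26 then
          d.insert (pvSuf x) (PySem.Set.add (d.getD (pvSuf x) PySem.Set.empty) (pvP x))
        else d) _ (fun d x _ => pvB_step d x)]
  rw [PySem.List.foldl_ite_eq_foldl_filter]

theorem pvB_getD (ideas : List String) (s : String) :
    (pvBuildSuffixPrefixes ideas).getD s PySem.Set.empty = pvG ideas s := by
  rw [pvB_eq_fold, pv_getD_fold_group (pvGoods ideas) pvSuf pvP PySem.Dict.empty s]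
  simp [pvG, PySem.Set.update_nil_left]

theorem pvB_keys (ideas : List String) :
    (pvBuildSuffixPrefixes ideas).keys = pvK ideas := by
  rw [pvB_eq_fold, PySem.Dict.keys_foldl_insert_key]
  simp [pvK, PySem.Set.update_nil_left]

theorem pvB_values (ideas : List String) :
    (pvBuildSuffixPrefixes ideas).values = (pvK ideas).map (pvG ideas) := by
  rw [PySem.Dict.values_eq_map_keys _ (by rw [pvB_keys]; exact PySem.Set.nodup_ofList _) PySem.Set.empty,
    pvB_keys]
  exact List.map_congr_left (fun k _ => pvB_getD ideas k)

theorem pvCounts_eq (values : List (PySem.Set Int)) :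
    pvBuildCounts values
      = (values.foldl (fun c pset =>
            pset.foldl (fun c a => c.insert a (c.getD a 0 + 1)) c) PySem.Dict.empty,
         values.foldl (fun sh pset =>
            pset.foldl (fun sh a =>
              pset.foldl (fun sh b =>
                if a < b then sh.insert (a, b) (sh.getD (a, b) 0 + 1) else sh) sh) sh)
            PySem.Dict.empty) := by
  unfold pvBuildCounts
  rw [PySem.List.foldl_congr_mem _ _
      (fun st pset =>
        (pset.foldl (fun c a => c.insert a (c.getD a 0 + 1)) st.1,
         pset.foldl (fun sh a =>
           pset.foldl (fun sh b =>
             if a < b then sh.insert (a, b) (sh.getD (a, b) 0 + 1) else sh) sh) st.2)) _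
      (fun st pset _ => by
        obtain ⟨c, sh⟩ := st
        exact PySem.List.foldl_prod_mk
          (fun c a => c.insert a (c.getD a 0 + 1))
          (fun sh a => pset.foldl (fun sh b =>
            if a < b then sh.insert (a, b) (sh.getD (a, b) 0 + 1) else sh) sh) pset c sh)]
  exact PySem.List.foldl_prod_mk
    (f := fun (c : PySem.Dict Int Int) pset => List.foldl (fun c a => c.insert a (c.getD a 0 + 1)) c pset)
    (g := fun (sh : PySem.Dict (Int × Int) Int) pset => List.foldl (fun sh a =>
      List.foldl (fun sh b => if a < b then sh.insert (a, b) (sh.getD (a, b) 0 + 1) else sh) sh pset) sh pset)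
    values PySem.Dict.empty PySem.Dict.empty

theorem pv_getD_foldl_add {κ α : Type} [BEq κ] [LawfulBEq κ]
    (l : List α) (F : PySem.Dict κ Int → α → PySem.Dict κ Int) (g : α → Int) (q : κ)
    (h : ∀ sh a, a ∈ l → (F sh a).getD q 0 = sh.getD q 0 + g a) :
    ∀ sh0, (l.foldl F sh0).getD q 0 = sh0.getD q 0 + (l.map g).sum := by
  induction l with
  | nil => simp
  | cons a t ih =>
    intro sh0
    rw [List.foldl_cons, ih (fun sh b hb => h sh b (List.mem_cons_of_mem a hb)),
        h sh0 a List.mem_cons_self]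
    simp; ring

theorem pvCounts_fst (values : List (PySem.Set Int)) (i : Int) :
    (pvBuildCounts values).1.getD i 0
      = (values.map (fun ps => (ps.count i : Int))).sum := by
  rw [pvCounts_eq]
  have := pv_getD_foldl_add values
    (fun c pset => pset.foldl (fun c a => c.insert a (c.getD a 0 + 1)) c)
    (fun ps => (ps.count i : Int)) i
    (fun sh ps _ => PySem.Dict.getD_foldl_insert_add_one ps sh i) PySem.Dict.empty
  simpa using this

theorem pvCounts_snd (values : List (PySem.Set Int)) (i j : Int) :
    (pvBuildCounts values).2.getD (i, j) 0
      = (values.map (fun ps =>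
          (ps.map (fun a => (ps.map (fun b =>
            if a < b ∧ (a, b) = (i, j) then (1 : Int) else 0)).sum)).sum)).sum := by
  rw [pvCounts_eq]
  have hb : ∀ (ps : List Int) (a : Int) (sh : PySem.Dict (Int × Int) Int) (b : Int), b ∈ ps →
      ((if a < b then sh.insert (a, b) (sh.getD (a, b) 0 + 1) else sh).getD (i, j) 0)
        = sh.getD (i, j) 0 + (if a < b ∧ (a, b) = (i, j) then (1 : Int) else 0) := by
    intro ps a sh b _
    by_cases hab : a < b
    · by_cases hq : ((a, b) : Int × Int) = (i, j)
      · rw [if_pos hab, if_pos ⟨hab, hq⟩, hq, PySem.Dict.getD_insert_self]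
      · rw [if_pos hab, if_neg (fun h => hq h.2),
          PySem.Dict.getD_insert_of_ne (hne := fun h => hq h.symm)]
        ring
    · rw [if_neg hab, if_neg (fun h => hab h.1)]; ring
  have ha : ∀ (ps : List Int) (sh : PySem.Dict (Int × Int) Int) (a : Int), a ∈ ps →
      ((ps.foldl (fun sh b => if a < b then sh.insert (a, b) (sh.getD (a, b) 0 + 1) else sh) sh).getD (i, j) 0)
        = sh.getD (i, j) 0 + (ps.map (fun b => if a < b ∧ (a, b) = (i, j) then (1 : Int) else 0)).sum := by
    intro ps sh a _
    exact pv_getD_foldl_add ps _ _ _ (hb ps a) sh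
  have := pv_getD_foldl_add values
    (fun sh pset => pset.foldl (fun sh a =>
      pset.foldl (fun sh b => if a < b then sh.insert (a, b) (sh.getD (a, b) 0 + 1) else sh) sh) sh)
    (fun ps => (ps.map (fun a => (ps.map (fun b =>
      if a < b ∧ (a, b) = (i, j) then (1 : Int) else 0)).sum)).sum) (i, j)
    (fun sh ps _ => pv_getD_foldl_add ps _ _ _ (ha ps) sh) PySem.Dict.empty
  simpa using this

theorem pv_count_nodup (ps : List Int) (hnd : ps.Nodup) (i : Int) :
    ((ps.count i : Int)) = if i ∈ ps then 1 else 0 := by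
  by_cases h : i ∈ ps
  · rw [if_pos h]; exact_mod_cast List.count_eq_one_of_mem hnd h
  · rw [if_neg h]; exact_mod_cast List.count_eq_zero_of_not_mem h

theorem pv_countP_sub {α : Type} [DecidableEq α] (K S : List α) (hK : K.Nodup) (hS : S.Nodup)
    (hsub : ∀ x ∈ S, x ∈ K) : K.countP (fun x => decide (x ∈ S)) = S.length := by
  rw [List.countP_eq_length_filter]
  have hperm : (K.filter (fun x => decide (x ∈ S))).Perm S := by
    rw [List.perm_ext_iff_of_nodup (hK.filter _) hS]
    intro a
    simp only [List.mem_filter, decide_eq_true_eq]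
    exact ⟨fun h => h.2, fun h => ⟨hsub a h, h⟩⟩
  exact hperm.length_eq

theorem pv_pair_sum (ps : List Int) (hnd : ps.Nodup) (i j : Int) (hij : i < j) :
    (ps.map (fun a => (ps.map (fun b =>
        if a < b ∧ (a, b) = (i, j) then (1 : Int) else 0)).sum)).sum
      = if i ∈ ps ∧ j ∈ ps then 1 else 0 := by
  have hinner : ∀ a ∈ ps,
      (ps.map (fun b => if a < b ∧ (a, b) = (i, j) then (1 : Int) else 0)).sum
        = if a = i then (if j ∈ ps then (1 : Int) else 0) else 0 := by
    intro a _
    by_cases hai : a = i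
    · subst hai
      have : ∀ b ∈ ps, (if a < b ∧ (a, b) = (a, j) then (1 : Int) else 0)
          = if b = j then 1 else 0 := by
        intro b _
        by_cases hbj : b = j
        · subst hbj; simp [hij]
        · simp [hbj]
      rw [List.map_congr_left this]
      have := PySem.List.sum_map_ite_one_zero (fun b => b == j) ps
      simp only [beq_iff_eq] at this
      rw [this]
      have : ps.countP (fun b => b == j) = ps.count j := rfl
      rw [this, pv_count_nodup ps hnd j]
      simp
    · have : ∀ b ∈ ps, (if a < b ∧ (a, b) = (i, j) then (1 : Int) else 0) = 0 := by
        intro b _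
        rw [if_neg]
        rintro ⟨-, heq⟩
        exact hai (congrArg Prod.fst heq)
      rw [List.map_congr_left this, if_neg hai]
      simp
  rw [List.map_congr_left hinner]
  by_cases hj : j ∈ ps
  · simp only [if_pos hj]
    have := PySem.List.sum_map_ite_one_zero (fun a => a == i) ps
    simp only [beq_iff_eq] at this
    rw [this]
    have : ps.countP (fun a => a == i) = ps.count i := rfl
    rw [this, pv_count_nodup ps hnd i]
    simp [hj]
  · simp [hj]

theorem pv_ch_toNat (i : Int) (h0 : 0 ≤ i) (h26 : i < 26) : (pvCh i).toNat = 97 + i.toNat := by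
  have hv : (97 + i.toNat).isValidChar := Or.inl (by omega)
  simp [pvCh, Char.toNat_ofNat, hv]

theorem pv_hd_eq_ch_iff (x : String) (i : Int) (h0 : 0 ≤ i) (h26 : i < 26) :
    ((pvHd x == pvCh i) = true) ↔ pvP x = i := by
  rw [beq_iff_eq]
  constructor
  · intro h
    have : (pvHd x).toNat = 97 + i.toNat := by rw [h, pv_ch_toNat i h0 h26]
    simp only [pvP]
    omega
  · intro h
    have ht : (pvHd x).toNat = (pvCh i).toNat := by
      rw [pv_ch_toNat i h0 h26]
      simp only [pvP] at h
      omega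
    apply Char.ext
    unfold Char.toNat at ht
    exact UInt32.toNat_inj.mp ht

theorem pv_mem_S_iff (ideas : List String) (s : String) (i : Int) (h0 : 0 ≤ i) (h26 : i < 26) :
    s ∈ pvS ideas i ↔ ∃ x ∈ ideas, pvP x = i ∧ pvSuf x = s := by
  simp only [pvS, PySem.Set.mem_ofList, List.mem_map, List.mem_filter]
  constructor
  · rintro ⟨x, ⟨hx, hc⟩, hs⟩
    exact ⟨x, hx, (pv_hd_eq_ch_iff x i h0 h26).mp hc, hs⟩
  · rintro ⟨x, hx, hp, hs⟩
    exact ⟨x, ⟨hx, (pv_hd_eq_ch_iff x i h0 h26).mpr hp⟩, hs⟩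

theorem pv_mem_G_iff (ideas : List String) (s : String) (i : Int) (h0 : 0 ≤ i) (h26 : i < 26) :
    i ∈ pvG ideas s ↔ s ∈ pvS ideas i := by
  rw [pv_mem_S_iff ideas s i h0 h26]
  simp only [pvG, pvGoods, PySem.Set.mem_ofList, List.mem_map, List.mem_filter,
    decide_eq_true_eq, beq_iff_eq]
  constructor
  · rintro ⟨x, ⟨⟨hx, -⟩, hs⟩, hp⟩
    exact ⟨x, hx, hp, hs⟩
  · rintro ⟨x, hx, hp, hs⟩
    exact ⟨x, ⟨⟨hx, by omega⟩, hs⟩, hp⟩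

theorem pv_S_sub_K (ideas : List String) (i : Int) (h0 : 0 ≤ i) (h26 : i < 26) :
    ∀ s ∈ pvS ideas i, s ∈ pvK ideas := by
  intro s hs
  rw [pv_mem_S_iff ideas s i h0 h26] at hs
  obtain ⟨x, hx, hp, hsu⟩ := hs
  simp only [pvK, pvGoods, PySem.Set.mem_ofList, List.mem_map, List.mem_filter,
    decide_eq_true_eq]
  exact ⟨x, ⟨hx, by omega⟩, hsu⟩

theorem pv_cnt_eq (ideas : List String) (i : Int) (h0 : 0 ≤ i) (h26 : i < 26) :
    (pvBuildCounts (pvBuildSuffixPrefixes ideas).values).1.getD i 0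
      = ((pvS ideas i).length : Int) := by
  rw [pvCounts_fst, pvB_values, List.map_map]
  simp only [Function.comp_def]
  have h1 : ∀ s ∈ pvK ideas, (((pvG ideas s).count i : Nat) : Int)
      = if (decide (s ∈ pvS ideas i)) = true then (1 : Int) else 0 := by
    intro s _
    rw [pv_count_nodup (pvG ideas s) (PySem.Set.nodup_ofList _) i]
    by_cases h : s ∈ pvS ideas i
    · rw [if_pos ((pv_mem_G_iff ideas s i h0 h26).mpr h), if_pos (by simp [h])]
    · rw [if_neg (fun hc => h ((pv_mem_G_iff ideas s i h0 h26).mp hc)), if_neg (by simp [h])]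
  rw [List.map_congr_left h1, PySem.List.sum_map_ite_one_zero]
  congr 1
  have := pv_countP_sub (pvK ideas) (pvS ideas i) (PySem.Set.nodup_ofList _)
    (PySem.Set.nodup_ofList _) (pv_S_sub_K ideas i h0 h26)
  simpa using this

theorem pv_shared_eq (ideas : List String) (i j : Int) (h0 : 0 ≤ i) (hij : i < j) (h26 : j < 26) :
    (pvBuildCounts (pvBuildSuffixPrefixes ideas).values).2.getD (i, j) 0
      = ((PySem.Set.inter (pvS ideas i) (pvS ideas j)).length : Int) := by
  rw [pvCounts_snd, pvB_values, List.map_map]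
  simp only [Function.comp_def]
  have h1 : ∀ s ∈ pvK ideas,
      (((pvG ideas s).map (fun a => ((pvG ideas s).map (fun b =>
        if a < b ∧ (a, b) = (i, j) then (1 : Int) else 0)).sum)).sum)
      = if (decide (s ∈ PySem.Set.inter (pvS ideas i) (pvS ideas j))) = true then (1 : Int) else 0 := by
    intro s _
    rw [pv_pair_sum (pvG ideas s) (PySem.Set.nodup_ofList _) i j hij]
    have hmem : (i ∈ pvG ideas s ∧ j ∈ pvG ideas s)
        ↔ s ∈ PySem.Set.inter (pvS ideas i) (pvS ideas j) := by
      rw [PySem.Set.mem_inter, pv_mem_G_iff ideas s i h0 (by omega),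
        pv_mem_G_iff ideas s j (by omega) h26]
    by_cases h : s ∈ PySem.Set.inter (pvS ideas i) (pvS ideas j)
    · rw [if_pos (hmem.mpr h), if_pos (by simp [h])]
    · rw [if_neg (fun hc => h (hmem.mp hc)), if_neg (by simp [h])]
  rw [List.map_congr_left h1, PySem.List.sum_map_ite_one_zero]
  congr 1
  have := pv_countP_sub (pvK ideas) (PySem.Set.inter (pvS ideas i) (pvS ideas j))
    (PySem.Set.nodup_ofList _)
    (PySem.Set.nodup_inter _ _ (PySem.Set.nodup_ofList _))
    (fun x hx => pv_S_sub_K ideas i h0 (by omega) x ((PySem.Set.mem_inter _ _ x).mp hx).1)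
  simpa using this

theorem pv_inter_length_comm {α : Type} [BEq α] [LawfulBEq α] (s t : PySem.Set α)
    (hs : s.Nodup) (ht : t.Nodup) :
    (PySem.Set.inter s t).length = (PySem.Set.inter t s).length := by
  apply List.Perm.length_eq
  rw [List.perm_ext_iff_of_nodup (PySem.Set.nodup_inter _ _ hs) (PySem.Set.nodup_inter _ _ ht)]
  intro a
  rw [PySem.Set.mem_inter, PySem.Set.mem_inter]
  tauto

theorem pv_len_diff_left {α : Type} [BEq α] [LawfulBEq α] (s t : PySem.Set α) :
    ((PySem.Set.diff s (PySem.Set.inter s t)).length : Int)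
      = (s.length : Int) - ((PySem.Set.inter s t).length : Int) := by
  show ((List.filter _ s).length : Int) = _
  rw [← List.countP_eq_length_filter]
  have hcongr : s.countP (fun x => !(PySem.Set.inter s t).contains x)
      = s.countP (fun x => !t.contains x) := by
    apply List.countP_congr
    intro a ha
    have : (PySem.Set.inter s t).contains a = t.contains a := by
      rw [Bool.eq_iff_iff, PySem.Set.contains_iff, PySem.Set.contains_iff, PySem.Set.mem_inter]
      exact ⟨fun h => h.2, fun h => ⟨ha, h⟩⟩
    rw [this]
  rw [hcongr]
  have hlen : (PySem.Set.inter s t).length = s.countP (fun x => t.contains x) := by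
    show (List.filter _ s).length = _
    rw [← List.countP_eq_length_filter]
  have hsplit := List.length_eq_countP_add_countP (fun x => t.contains x) (l := s)
  rw [hlen]
  have : s.countP (fun x => !t.contains x) = s.countP (fun a => decide ¬(t.contains a) = true) := by
    apply List.countP_congr; intro a _; simp
  omega

theorem pv_len_diff_right {α : Type} [BEq α] [LawfulBEq α] (s t : PySem.Set α)
    (hs : s.Nodup) (ht : t.Nodup) :
    ((PySem.Set.diff t (PySem.Set.inter s t)).length : Int)
      = (t.length : Int) - ((PySem.Set.inter s t).length : Int) := by
  have h1 : (PySem.Set.diff t (PySem.Set.inter s t)).length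
      = (PySem.Set.diff t (PySem.Set.inter t s)).length := by
    apply List.Perm.length_eq
    apply (List.perm_ext_iff_of_nodup (PySem.Set.nodup_diff _ _ ht) (PySem.Set.nodup_diff _ _ ht)).mpr
    intro a
    rw [PySem.Set.mem_diff, PySem.Set.mem_diff, PySem.Set.mem_inter, PySem.Set.mem_inter]
    tauto
  rw [h1, pv_len_diff_left t s, pv_inter_length_comm t s ht hs]

theorem pv_S_empty_of_not_any (ideas : List String) (i : Int)
    (h : ideas.any (fun s => pvHd s == pvCh i) = false) : pvS ideas i = [] := by
  unfold pvS
  have : ideas.filter (fun s => pvHd s == pvCh i) = [] := by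
    rw [List.filter_eq_nil_iff]
    intro a ha
    simp only [List.any_eq_false] at h
    simp [h a ha]
  rw [this]
  rfl

theorem pv_term_eq (ideas : List String) (i j : Int)
    (h0 : 0 ≤ i) (hij : i < j) (h26 : j < 26) (total : Int) :
    (let suffix_map := pvBuildSuffixMap ideas
     if suffix_map.contains (Char.ofNat (97 + i.toNat)) && suffix_map.contains (Char.ofNat (97 + j.toNat)) then
       let s1 := suffix_map.getD (Char.ofNat (97 + i.toNat)) PySem.Set.empty
       let s2 := suffix_map.getD (Char.ofNat (97 + j.toNat)) PySem.Set.empty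
       let common := PySem.Set.inter s1 s2
       total + PySem.Set.len (PySem.Set.diff s1 common) * PySem.Set.len (PySem.Set.diff s2 common)
     else total)
    = total + ((pvBuildCounts (pvBuildSuffixPrefixes ideas).values).1.getD i 0
                - (pvBuildCounts (pvBuildSuffixPrefixes ideas).values).2.getD (i, j) 0)
            * ((pvBuildCounts (pvBuildSuffixPrefixes ideas).values).1.getD j 0
                - (pvBuildCounts (pvBuildSuffixPrefixes ideas).values).2.getD (i, j) 0) := by
  have hchi : Char.ofNat (97 + i.toNat) = pvCh i := rfl
  have hchj : Char.ofNat (97 + j.toNat) = pvCh j := rfl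
  have hSi := pvA_getD ideas (pvCh i)
  have hSj := pvA_getD ideas (pvCh j)
  have hSi' : (pvBuildSuffixMap ideas).getD (pvCh i) PySem.Set.empty = pvS ideas i := hSi
  have hSj' : (pvBuildSuffixMap ideas).getD (pvCh j) PySem.Set.empty = pvS ideas j := hSj
  rw [pv_cnt_eq ideas i h0 (by omega), pv_cnt_eq ideas j (by omega) h26,
    pv_shared_eq ideas i j h0 hij h26]
  simp only [hchi, hchj, pvA_contains]
  by_cases hgi : ideas.any (fun s => pvHd s == pvCh i)
  · by_cases hgj : ideas.any (fun s => pvHd s == pvCh j)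
    · simp only [hgi, hgj, Bool.and_self, if_pos]
      rw [hSi', hSj']
      show total + PySem.Set.len (PySem.Set.diff (pvS ideas i) _) * PySem.Set.len (PySem.Set.diff (pvS ideas j) _) = _
      unfold PySem.Set.len
      rw [pv_len_diff_left (pvS ideas i) (pvS ideas j),
        pv_len_diff_right (pvS ideas i) (pvS ideas j)
          (PySem.Set.nodup_ofList _) (PySem.Set.nodup_ofList _)]
    · have hempty : pvS ideas j = [] := pv_S_empty_of_not_any ideas j (by simpa using hgj)
      have hinter : PySem.Set.inter (pvS ideas i) ([] : List String) = ([] : List String) := by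
        simp [PySem.Set.inter, PySem.Set.contains]
      simp [hgj, hempty, hinter]
  · have hempty : pvS ideas i = [] := pv_S_empty_of_not_any ideas i (by simpa using hgi)
    simp [hgi, hempty, PySem.Set.inter]

-- ===== VERDICT (by name: the statement is the Claim_ definition above) =====
set_option maxRecDepth 8192 in
theorem company_names_spec : Claim_equal_company_names := by
  intro ideas _ _
  unfold Spec_company_names
  simp only [company_names, company_names_alt]
  congr 1
  apply PySem.List.foldl_congr_mem
  intro acc i hi
  apply PySem.List.foldl_congr_mem
  intro acc2 j hj
  rw [PySem.List.mem_pyRange_one] at hi hj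
  exact pv_term_eq ideas i j hi.1 hj.1 hj.2 acc2
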